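-- pv_equiv track=rewrite | github.com/drinr1/permafrost | crypter.py | verify_unshuffle
-- ===== SOURCE A (Python) =====
-- def verify_unshuffle(blocks_shuffled, seed, mult, inc, mult_inv, n):
--     state = seed
--     for _ in range(n - 1):
--         state = (state * mult + inc) & (2**64 - 1)
--     result = list(blocks_shuffled)
--     for i in range(1, n):
--         j = (state >> 33) % (i + 1)
--         result[i], result[j] = result[j], result[i]
--         state = ((state - inc) * mult_inv) & (2**64 - 1)
--     return result
-- ===== SOURCE B (Python) =====
-- def _affine_pow(mult, inc, k, M):
--     # coefficient pair (a, b) of the k-th composition of x -> (mult*x + inc) mod M,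
--     # by exponentiation-by-squaring
--     if k == 0:
--         return (1, 0)
--     a, b = _affine_pow(mult, inc, k // 2, M)
--     a, b = (a * a) % M, (a * b + b) % M
--     if k % 2 == 1:
--         a, b = (mult * a) % M, (mult * b + inc) % M
--     return (a, b)
--
--
-- def verify_unshuffle(blocks_shuffled, seed, mult, inc, mult_inv, n):
--     M = 2 ** 64
--     # jump the LCG ahead n-1 steps in O(log n) instead of a loop
--     a, b = _affine_pow(mult, inc, max(n - 1, 0), M)
--     state = (a * seed + b) % M
--     # first pass: collect the swap partners while stepping the state backwards
--     js = []
--     for i in range(1, n):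
--         js.append((state >> 33) % (i + 1))
--         state = ((state - inc) * mult_inv) % M
--     # second pass: apply the swaps
--     result = list(blocks_shuffled)
--     for i, ji in zip(range(1, n), js):
--         result[i], result[ji] = result[ji], result[i]
--     return result
-- ===== Notes on version B (the rewrite author's own statement) =====
-- stated objective: alternative
-- what changed: B replaces the n-1-step forward LCG loop by an O(log n) affine jump-ahead (exponentiation-by-squaring on the coefficient pair of x->mult*x+inc mod 2^64) and splits the combined unshuffle loop into two passes: one that collects the swap indices while stepping the state backwards, and one that applies the swaps.
import Mathlib
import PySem

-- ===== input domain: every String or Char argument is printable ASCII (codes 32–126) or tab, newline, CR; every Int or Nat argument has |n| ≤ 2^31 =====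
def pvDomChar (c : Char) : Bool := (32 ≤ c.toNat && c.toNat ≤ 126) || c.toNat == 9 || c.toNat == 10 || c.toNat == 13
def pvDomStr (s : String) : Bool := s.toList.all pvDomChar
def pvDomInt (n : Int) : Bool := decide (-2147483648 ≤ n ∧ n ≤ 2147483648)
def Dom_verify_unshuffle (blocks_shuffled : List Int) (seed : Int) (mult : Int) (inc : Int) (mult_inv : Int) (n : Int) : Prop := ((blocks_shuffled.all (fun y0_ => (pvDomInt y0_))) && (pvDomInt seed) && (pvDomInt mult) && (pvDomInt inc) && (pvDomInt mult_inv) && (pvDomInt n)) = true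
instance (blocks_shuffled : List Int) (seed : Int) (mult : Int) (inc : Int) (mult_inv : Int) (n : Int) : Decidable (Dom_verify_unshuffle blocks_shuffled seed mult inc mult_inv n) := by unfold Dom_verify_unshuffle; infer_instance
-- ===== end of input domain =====

-- B computes the same unshuffle but jumps the LCG ahead by squaring the affine map's
-- coefficient pair and splits the unshuffle loop into a collect-indices pass and a swap pass.

-- ===== PORT A =====
def verify_unshuffle (blocks_shuffled : List Int) (seed : Int) (mult : Int) (inc : Int) (mult_inv : Int) (n : Int) : List Int :=
  -- state = seed; for _ in range(n-1): state = (state*mult+inc) & (2**64-1)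
  let state := (List.range (n - 1).toNat).foldl
    (fun s _ => PySem.Int.band (s * mult + inc) 18446744073709551615) seed
  -- result = list(blocks_shuffled); for i in range(1, n): swap; step state backwards
  let p := (PySem.List.pyRange 1 n 1).foldl
    (fun (p : List Int × Int) i =>
      let j := (p.2 >>> (33 : Nat)) % (i + 1)
      ((p.1.set i.toNat (p.1.getD j.toNat 0)).set j.toNat (p.1.getD i.toNat 0),
       PySem.Int.band ((p.2 - inc) * mult_inv) 18446744073709551615))
    (blocks_shuffled, state)
  p.1

-- ===== PORT B =====
-- _affine_pow(mult, inc, k, M): coefficient pair of the k-th composition of x -> (mult*x+inc) % M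
def pvAffinePow (mult inc : Int) (k : Nat) (M : Int) : Int × Int :=
  if k = 0 then (1, 0)
  else
    let p := pvAffinePow mult inc (k / 2) M
    let q := ((p.1 * p.1) % M, (p.1 * p.2 + p.2) % M)
    if k % 2 = 1 then ((mult * q.1) % M, (mult * q.2 + inc) % M) else q
termination_by k
decreasing_by exact Nat.div_lt_self (Nat.pos_of_ne_zero (by omega)) (by norm_num)

def verify_unshuffle_alt (blocks_shuffled : List Int) (seed : Int) (mult : Int) (inc : Int) (mult_inv : Int) (n : Int) : List Int :=
  let M : Int := 18446744073709551616   -- M = 2**64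
  let ab := pvAffinePow mult inc (n - 1).toNat M     -- max(n-1, 0) iterations, jumped in one go
  let state := (ab.1 * seed + ab.2) % M
  -- js = []; for i in range(1, n): js.append((state >> 33) % (i+1)); state = ((state-inc)*mult_inv) % M
  let js := ((PySem.List.pyRange 1 n 1).foldl
      (fun (q : List Int × Int) i =>
        (q.1 ++ [(q.2 >>> (33 : Nat)) % (i + 1)], ((q.2 - inc) * mult_inv) % M))
      ([], state)).1
  -- result = list(blocks_shuffled); for i, ji in zip(range(1, n), js): swap
  ((PySem.List.pyRange 1 n 1).zip js).foldl
    (fun res pr => (res.set pr.1.toNat (res.getD pr.2.toNat 0)).set pr.2.toNat (res.getD pr.1.toNat 0))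
    blocks_shuffled

-- ===== PRECONDITION & SPEC =====
-- Pre_ excludes exactly the inputs where Python A raises IndexError: the unshuffle loop
-- touches result[n-1], so A raises iff 2 ≤ n and n > len(blocks_shuffled).
def Pre_verify_unshuffle (blocks_shuffled : List Int) (seed : Int) (mult : Int) (inc : Int) (mult_inv : Int) (n : Int) : Prop :=
  n ≤ (blocks_shuffled.length : Int) ∨ n ≤ 1
instance (blocks_shuffled : List Int) (seed : Int) (mult : Int) (inc : Int) (mult_inv : Int) (n : Int) : Decidable (Pre_verify_unshuffle blocks_shuffled seed mult inc mult_inv n) := by unfold Pre_verify_unshuffle; infer_instance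
def pvWitness_verify_unshuffle : List Int × Int × Int × Int × Int × Int := ([3, 1, 2], 5, 7, 9, 11, 3)

def Spec_verify_unshuffle (blocks_shuffled : List Int) (seed : Int) (mult : Int) (inc : Int) (mult_inv : Int) (n : Int) (out : List Int) : Prop := out = verify_unshuffle_alt blocks_shuffled seed mult inc mult_inv n
instance (blocks_shuffled : List Int) (seed : Int) (mult : Int) (inc : Int) (mult_inv : Int) (n : Int) (out : List Int) : Decidable (Spec_verify_unshuffle blocks_shuffled seed mult inc mult_inv n out) := by unfold Spec_verify_unshuffle; infer_instance

-- ===== CLAIM (what is proved, stated in full; the proofs are below) =====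
def Claim_equal_verify_unshuffle : Prop := ∀ (blocks_shuffled : List Int) (seed : Int) (mult : Int) (inc : Int) (mult_inv : Int) (n : Int), Dom_verify_unshuffle blocks_shuffled seed mult inc mult_inv n → Pre_verify_unshuffle blocks_shuffled seed mult inc mult_inv n → Spec_verify_unshuffle blocks_shuffled seed mult inc mult_inv n (verify_unshuffle blocks_shuffled seed mult inc mult_inv n)

-- ===== LEMMAS AND PROOFS =====

-- the list of swap partners produced from initial state st over index list is
def pvJs (inc mult_inv : Int) : Int → List Int → List Int
  | _, [] => []
  | st, i :: t =>
      (st >>> (33 : Nat)) % (i + 1) :: pvJs inc mult_inv (((st - inc) * mult_inv) % 18446744073709551616) t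

theorem pv_nat_mask (x : Nat) : x &&& 18446744073709551615 = x % 18446744073709551616 := by
  have := Nat.and_two_pow_sub_one_eq_mod x 64
  norm_num at this
  exact this

-- z & (2^64 - 1) = z % 2^64, for every integer z (Python two's-complement &)
theorem pv_band_mask (z : Int) :
    PySem.Int.band z 18446744073709551615 = z % 18446744073709551616 := by
  have hlit : Int.toNat 18446744073709551615 = 18446744073709551615 := rfl
  simp only [PySem.Int.band]
  split
  · rename_i h
    norm_num
    rw [hlit, pv_nat_mask]
    omega
  · rename_i h
    norm_num
    rw [hlit, Nat.and_comm, pv_nat_mask]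
    omega

-- folding a constant-step function over range k is k-fold iteration
theorem pv_foldl_range_iterate (g : Int → Int) (k : Nat) (x : Int) :
    (List.range k).foldl (fun s _ => g s) x = g^[k] x := by
  induction k with
  | zero => simp
  | succ m ih => rw [List.range_succ, List.foldl_append, Function.iterate_succ_apply']; simp [ih]

theorem pv_emod_coeffs (a b x M : Int) : (a % M * x + b % M) % M = (a * x + b) % M := by
  have ha : Int.ModEq M (a % M) a := Int.emod_emod_of_dvd a dvd_rfl
  have hb : Int.ModEq M (b % M) b := Int.emod_emod_of_dvd b dvd_rfl
  exact (ha.mul_right x).add hb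

theorem pv_emod_arg (a b y M : Int) : (a * (y % M) + b) % M = (a * y + b) % M := by
  have hy : Int.ModEq M (y % M) y := Int.emod_emod_of_dvd y dvd_rfl
  exact (hy.mul_left a).add_right b

-- pvAffinePow computes the coefficients of the k-th iterate of s -> (s*mult+inc) % M
theorem pv_affine_spec (mult inc M : Int) : ∀ (k : Nat) (x : Int),
    ((pvAffinePow mult inc k M).1 * x + (pvAffinePow mult inc k M).2) % M
      = (fun s => (s * mult + inc) % M)^[k] x % M := by
  intro k
  induction k using Nat.strong_induction_on with
  | _ k ih =>
    intro x
    rw [pvAffinePow]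
    by_cases h0 : k = 0
    · subst h0; simp
    · have ih2 := ih (k / 2) (Nat.div_lt_self (Nat.pos_of_ne_zero h0) one_lt_two)
      simp only [if_neg h0]
      set a := (pvAffinePow mult inc (k / 2) M).1 with ha
      set b := (pvAffinePow mult inc (k / 2) M).2 with hb
      have heven : ∀ y : Int, (a * a % M * y + (a * b + b) % M) % M
          = (fun s => (s * mult + inc) % M)^[k / 2 + k / 2] y % M := by
        intro y
        rw [pv_emod_coeffs]
        have hr : a * a * y + (a * b + b) = a * (a * y + b) + b := by ring
        rw [hr, ← pv_emod_arg, ih2 y, pv_emod_arg, ih2, Function.iterate_add_apply]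
      by_cases hodd : k % 2 = 1
      · simp only [if_pos hodd]
        rw [pv_emod_coeffs]
        have hr : mult * (a * a % M) * x + (mult * ((a * b + b) % M) + inc)
            = mult * (a * a % M * x + (a * b + b) % M) + inc := by ring
        have hk : k = (k / 2 + k / 2) + 1 := by omega
        rw [hr, ← pv_emod_arg, heven x, pv_emod_arg]
        conv_rhs => rw [hk, Function.iterate_succ_apply']
        generalize (fun s => (s * mult + inc) % M)^[k / 2 + k / 2] x = w
        show (mult * w + inc) % M = (w * mult + inc) % M % M
        rw [Int.emod_emod_of_dvd _ dvd_rfl]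
        ring_nf
      · simp only [if_neg hodd]
        have hk : k = k / 2 + k / 2 := by omega
        rw [heven x, ← hk]

-- folding the collect pass with an accumulator yields pvJs
theorem pv_js_acc (inc mult_inv : Int) (is : List Int) : ∀ (st : Int) (acc : List Int),
    (is.foldl
      (fun (q : List Int × Int) i =>
        (q.1 ++ [(q.2 >>> (33 : Nat)) % (i + 1)], ((q.2 - inc) * mult_inv) % 18446744073709551616))
      (acc, st)).1 = acc ++ pvJs inc mult_inv st is := by
  induction is with
  | nil => intro st acc; simp [pvJs]
  | cons i t ih =>
      intro st acc
      simp only [List.foldl_cons, pvJs]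
      rw [ih]
      simp

-- fusing A's combined loop into collect-then-swap
theorem pv_fuse (inc mult_inv : Int) (is : List Int) : ∀ (res : List Int) (st : Int),
    ((is.foldl
      (fun (p : List Int × Int) i =>
        let j := (p.2 >>> (33 : Nat)) % (i + 1)
        ((p.1.set i.toNat (p.1.getD j.toNat 0)).set j.toNat (p.1.getD i.toNat 0),
         PySem.Int.band ((p.2 - inc) * mult_inv) 18446744073709551615))
      (res, st)).1)
    = ((is.zip (pvJs inc mult_inv st is)).foldl
        (fun r pr => (r.set pr.1.toNat (r.getD pr.2.toNat 0)).set pr.2.toNat (r.getD pr.1.toNat 0))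
        res) := by
  induction is with
  | nil => intro res st; simp [pvJs]
  | cons i t ih =>
      intro res st
      simp only [List.foldl_cons, pvJs, List.zip_cons_cons]
      rw [pv_band_mask ((st - inc) * mult_inv)]
      exact ih _ _

-- ===== VERDICT (by name: the statement is the Claim_ definition above) =====
theorem verify_unshuffle_spec : Claim_equal_verify_unshuffle := by
  intro bs seed mult inc mult_inv n _ _
  unfold Spec_verify_unshuffle verify_unshuffle verify_unshuffle_alt
  simp only []
  by_cases hn : n ≤ 1
  · rw [PySem.List.pyRange_one_eq_nil hn]
    simp
  · have hstate :
        (List.range (n - 1).toNat).foldl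
            (fun s _ => PySem.Int.band (s * mult + inc) 18446744073709551615) seed
          = ((pvAffinePow mult inc (n - 1).toNat 18446744073709551616).1 * seed
              + (pvAffinePow mult inc (n - 1).toNat 18446744073709551616).2) % 18446744073709551616 := by
      simp only [pv_band_mask]
      rw [pv_foldl_range_iterate (fun s => (s * mult + inc) % 18446744073709551616),
          pv_affine_spec]
      have hk : (n - 1).toNat = ((n - 1).toNat - 1) + 1 := by omega
      rw [hk, Function.iterate_succ_apply']
      generalize (fun s => (s * mult + inc) % 18446744073709551616)^[(n - 1).toNat - 1] seed = w
      show (w * mult + inc) % 18446744073709551616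
          = (w * mult + inc) % 18446744073709551616 % 18446744073709551616
      rw [Int.emod_emod_of_dvd _ dvd_rfl]
    rw [hstate, pv_fuse, pv_js_acc]
    simp
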